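-- pv_equiv track=rewrite | github.com/miliar/Code_Jam_Webscraper | solutions_python/solutions_year16_round0_nr2/2856.py | stripOnes
-- ===== SOURCE A (Python) =====
-- def stripOnes(arr):
-- 	index = len(arr)-1
-- 	while index>=0:
-- 		if arr[index] == 1:
-- 			index = index-1
-- 		else:
-- 			break
-- 	return index+1
-- ===== SOURCE B (Python) =====
-- def stripOnes(arr):
--     result = 0
--     for i, x in enumerate(arr):
--         if x != 1:
--             result = i + 1
--     return result
-- ===== Notes on version B (the rewrite author's own statement) =====
-- stated objective: simpler
-- what changed: Single forward pass recording the position just past the last non-1 element, instead of a reverse scan with early break from the end.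
import Mathlib
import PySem

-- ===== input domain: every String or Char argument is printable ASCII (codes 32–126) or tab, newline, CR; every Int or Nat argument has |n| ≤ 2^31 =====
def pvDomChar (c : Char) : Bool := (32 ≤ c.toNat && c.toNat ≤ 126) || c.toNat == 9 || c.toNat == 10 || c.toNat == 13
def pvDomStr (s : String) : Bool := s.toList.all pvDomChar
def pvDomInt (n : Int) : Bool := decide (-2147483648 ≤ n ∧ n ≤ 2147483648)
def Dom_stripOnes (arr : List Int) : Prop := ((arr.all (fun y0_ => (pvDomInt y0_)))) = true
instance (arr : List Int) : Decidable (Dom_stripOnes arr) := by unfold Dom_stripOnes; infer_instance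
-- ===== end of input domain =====

-- B replaces A's reverse scan with early break by a single forward pass (simpler decomposition).

-- ===== PORT A =====
-- A's while loop over the decreasing variable 'index'; here n = index + 1 (n = 0 ↔ loop exits with index = -1).
def stripOnesLoop (arr : List Int) : Nat → Int
  | 0 => 0
  | n + 1 => if PySem.List.pyGetD arr (n : Int) 0 = 1 then stripOnesLoop arr n else ((n : Int) + 1)

def stripOnes (arr : List Int) : Int := stripOnesLoop arr arr.length

-- ===== PORT B =====
def stripOnes_alt (arr : List Int) : Int :=
  (PySem.List.enumerate arr 0).foldl (fun res p => if p.2 ≠ 1 then p.1 + 1 else res) 0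

-- ===== PRECONDITION & SPEC =====
def Spec_stripOnes (arr : List Int) (out : Int) : Prop := out = stripOnes_alt arr
instance (arr : List Int) (out : Int) : Decidable (Spec_stripOnes arr out) := by unfold Spec_stripOnes; infer_instance

-- ===== CLAIM (what is proved, stated in full; the proofs are below) =====
def Claim_equal_stripOnes : Prop := ∀ (arr : List Int), Dom_stripOnes arr → Spec_stripOnes arr (stripOnes arr)

-- ===== LEMMAS AND PROOFS =====

lemma stripOnesLoop_append (xs : List Int) (x : Int) :
    ∀ n, n ≤ xs.length → stripOnesLoop (xs ++ [x]) n = stripOnesLoop xs n := by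
  intro n
  induction n with
  | zero => intro _; rfl
  | succ n ih =>
    intro h
    have hn : n < xs.length := by omega
    simp only [stripOnesLoop, PySem.List.pyGetD_natCast,
      List.getD_eq_getElem?_getD, List.getElem?_append_left hn, ih (by omega)]

lemma enumerate_append_singleton (xs : List Int) (x : Int) :
    ∀ s : Int, PySem.List.enumerate (xs ++ [x]) s
      = PySem.List.enumerate xs s ++ [(s + xs.length, x)] := by
  induction xs with
  | nil => intro s; simp [PySem.List.enumerate_nil, PySem.List.enumerate_cons]
  | cons y ys ih =>
    intro s
    simp only [List.cons_append, PySem.List.enumerate_cons, ih (s + 1), List.length_cons]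
    push_cast
    ring_nf

theorem stripOnes_eq_alt (arr : List Int) : stripOnes arr = stripOnes_alt arr := by
  induction arr using List.reverseRecOn with
  | nil => rfl
  | append_singleton xs x ih =>
    have hA : stripOnes (xs ++ [x])
        = if x = 1 then stripOnes xs else ((xs.length : Int) + 1) := by
      simp only [stripOnes, List.length_append, List.length_singleton, stripOnesLoop,
        PySem.List.pyGetD_natCast, List.getD_eq_getElem?_getD,
        List.getElem?_append_right (Nat.le_refl xs.length), Nat.sub_self,
        List.getElem?_cons_zero, Option.getD_some,
        stripOnesLoop_append xs x xs.length (Nat.le_refl _)]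
    have hB : stripOnes_alt (xs ++ [x])
        = if x ≠ 1 then ((xs.length : Int) + 1) else stripOnes_alt xs := by
      simp only [stripOnes_alt, enumerate_append_singleton xs x 0, List.foldl_append,
        List.foldl_cons, List.foldl_nil, zero_add]
    rw [hA, hB, ih]
    by_cases hx : x = 1 <;> simp [hx]

-- ===== VERDICT (by name: the statement is the Claim_ definition above) =====
theorem stripOnes_spec : Claim_equal_stripOnes := by
  intro arr _
  exact stripOnes_eq_alt arr
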